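/- GENERATED by tools/from_farm_form.py from prooffarm-gif/accepted/DGifGetScreenDesc.1/Proof.lean (a worked proof of the farm's unit `DGifGetScreenDesc.1`,
   accepted by the verdict) — do not edit. -/
import Gif.Spec.Units.DGifGetScreenDesc_1
import Gif.Spec.AllSegs
import Gif.Spec.Proved.DGifGetScreenDesc_1_Lemmas

open X86 X86.User Asan ProgX.Base ProgX.Base.Spec Gif.Spec

/-!
  `DGifGetScreenDesc.1` (0x1080c6 … 0x1080e4 and 0x108114 … 0x10813b, 20 instructions; dgif_lib.c:252-263): A BODY SEGMENT OF A
  PROTECTED FUNCTION WITH TWO CALLS IN THE MIDDLE. The return addresses 0x10811f (`ret4`) and 0x108137 (`ret5`) of the two calls of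
  `DGifGetWord` are not cuts of the design, so the unit makes them cuts of its own: a private assertion `sd1_AtRet` (`Body` + the
  result in `eax`) and three walks (Lemmas.lean), chained here.
-/

/-- Segment 1 of `DGifGetScreenDesc` takes `Start` at 0x1080c6 to `Body` at 0x10813b or to `Done` at 0x1080f7. -/
theorem Gif.Spec.Proved.DGifGetScreenDesc_1_ok : Gif.Spec.DGifGetScreenDesc_1.Statement := by
  intro Lay hLay μ hμ u₀ hcode h_DGifGetWord h_asan_load8_noabort h_asan_load4_noabort H rest frames F R e ret v hat
  -- the callee's contract for the frame list of the body (the own frame in front)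
  have hgw := h_DGifGetWord H rest (DGifGetScreenDesc.framesIn frames e) F R
  -- 0x1080c6 … the two checked loads … the first call … 0x10811f
  refine (Gif.Spec.DGifGetScreenDesc_1.sd1_seg_head Lay hLay μ hμ u₀ hcode H rest frames F R e ret hgw
    h_asan_load8_noabort h_asan_load4_noabort v hat).trans ?_
  intro v1 hv1
  -- 0x10811f … (GIF_ERROR: 0x1080f7) … the second call … 0x108137
  refine (Gif.Spec.DGifGetScreenDesc_1.sd1_seg_mid Lay hLay μ hμ u₀ hcode H rest frames F R e ret hgw v1 hv1).trans ?_
  intro v2 hv2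
  rcases hv2 with hret5 | hexit
  · -- 0x108137 … 0x10813b | 0x1080f7
    exact Gif.Spec.DGifGetScreenDesc_1.sd1_seg_tail Lay hLay μ hμ u₀ hcode H rest frames F R e ret v2 hret5
  · -- already at the epilogue
    exact ReachVia.done (Or.inr hexit)
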